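-- pv_equiv track=rewrite | github.com/falyse/advent-of-code | 2019/17/main.py | process_outputs
-- ===== SOURCE A (Python) =====
-- def process_outputs(outputs):
--     status_map = {}
--     loc = (0,0)
--     for o in outputs:
--         if o == 10:
--             loc = (0, loc[1] + 1)
--         else:
--             status_map[loc] = chr(o)
--             loc = (loc[0] + 1, loc[1])
--     return status_map
-- ===== SOURCE B (Python) =====
-- def process_outputs(outputs):
--     # Two-phase: split the stream into rows at each 10, then place rows with nested enumerate.
--     rows = []
--     cur = []
--     for o in outputs:
--         if o == 10:
--             rows.append(cur)
--             cur = []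
--         else:
--             cur.append(o)
--     rows.append(cur)
--     status_map = {}
--     for y, row in enumerate(rows):
--         for x, o in enumerate(row):
--             status_map[(x, y)] = chr(o)
--     return status_map
-- ===== Notes on version B (the rewrite author's own statement) =====
-- stated objective: alternative
-- what changed: Replaces A's single pass with a mutable cursor pair by a two-phase decomposition: first partition the stream into rows at each newline code, then fill the map with a nested enumerate over rows and columns.
import Mathlib
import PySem

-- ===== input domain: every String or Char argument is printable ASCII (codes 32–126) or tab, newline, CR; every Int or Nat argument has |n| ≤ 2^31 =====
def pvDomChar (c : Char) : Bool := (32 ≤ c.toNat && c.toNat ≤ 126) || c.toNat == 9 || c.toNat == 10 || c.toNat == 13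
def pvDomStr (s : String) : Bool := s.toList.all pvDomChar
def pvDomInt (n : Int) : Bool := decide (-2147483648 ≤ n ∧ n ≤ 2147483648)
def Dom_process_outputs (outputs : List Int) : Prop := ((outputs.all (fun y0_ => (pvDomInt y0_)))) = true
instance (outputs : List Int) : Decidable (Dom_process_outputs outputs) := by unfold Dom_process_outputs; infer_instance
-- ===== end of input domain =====

-- B replaces A's single-pass cursor walk by a two-phase row-partition + nested enumerate (alternative decomposition, same cost).


-- ===== PORT A =====
-- Python dict assignment d[(x,y)] = v on an association list flattened to triples: overwrite in place, else append.
def pyDictSet (m : List (Int × Int × String)) (x y : Int) (v : String) : List (Int × Int × String) :=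
  match m with
  | [] => [(x, y, v)]
  | (a, b, w) :: t => if a = x ∧ b = y then (x, y, v) :: t else (a, b, w) :: pyDictSet t x y v

-- chr(o); exact for 0 ≤ o ≤ 0x10FFFF excluding surrogates, which Pre_ guarantees.
def pyChr (o : Int) : String := String.singleton (Char.ofNat o.toNat)

def aStep (st : List (Int × Int × String) × Int × Int) (o : Int) : List (Int × Int × String) × Int × Int :=
  if o == 10 then (st.1, 0, st.2.2 + 1)
  else (pyDictSet st.1 st.2.1 st.2.2 (pyChr o), st.2.1 + 1, st.2.2)

def process_outputs (outputs : List Int) : List (Int × Int × String) :=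
  (outputs.foldl aStep ([], 0, 0)).1

-- ===== PORT B =====
def bSplit (rc : List (List Int) × List Int) (o : Int) : List (List Int) × List Int :=
  if o == 10 then (rc.1 ++ [rc.2], []) else (rc.1, rc.2 ++ [o])

def bInner (y : Int) (m : List (Int × Int × String)) (xo : Int × Int) : List (Int × Int × String) :=
  pyDictSet m xo.1 y (pyChr xo.2)

def bOuter (m : List (Int × Int × String)) (yr : Int × List Int) : List (Int × Int × String) :=
  (PySem.List.enumerate yr.2).foldl (bInner yr.1) m

def process_outputs_alt (outputs : List Int) : List (Int × Int × String) :=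
  let rc := outputs.foldl bSplit ([], [])
  (PySem.List.enumerate (rc.1 ++ [rc.2])).foldl bOuter []

-- ===== PRECONDITION & SPEC =====
-- Pre_ excludes elements on which chr(o) raises ValueError (o < 0 or o > 0x10FFFF) and the surrogate
-- codepoints 0xD800–0xDFFF, where A returns a lone-surrogate str not representable as a Lean String.
def Pre_process_outputs (outputs : List Int) : Prop :=
  ∀ o ∈ outputs, o = 10 ∨ (0 ≤ o ∧ o ≤ 1114111 ∧ ¬(55296 ≤ o ∧ o ≤ 57343))
instance (outputs : List Int) : Decidable (Pre_process_outputs outputs) := by unfold Pre_process_outputs; infer_instance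

def pvWitness_process_outputs : List Int := [72, 105, 10, 10, 35, 46, 10]

def Spec_process_outputs (outputs : List Int) (out : List (Int × Int × String)) : Prop := out = process_outputs_alt outputs
instance (outputs : List Int) (out : List (Int × Int × String)) : Decidable (Spec_process_outputs outputs out) := by unfold Spec_process_outputs; infer_instance

-- ===== CLAIM (what is proved, stated in full; the proofs are below) =====
def Claim_equal_process_outputs : Prop := ∀ (outputs : List Int), Dom_process_outputs outputs → Pre_process_outputs outputs → Spec_process_outputs outputs (process_outputs outputs)

-- ===== LEMMAS AND PROOFS =====

-- Row-major spec both ports are reduced to.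
def fSpec : List Int → Int → Int → List (Int × Int × String)
  | [], _, _ => []
  | o :: t, x, y => if o = 10 then fSpec t 0 (y + 1) else (x, y, pyChr o) :: fSpec t (x + 1) y

def entRow (row : List Int) (x y : Int) : List (Int × Int × String) :=
  (PySem.List.enumerate row x).map (fun p => (p.1, y, pyChr p.2))

def hAll : List (List Int) → Int → List (Int × Int × String)
  | [], _ => []
  | r :: rs, y => entRow r 0 y ++ hAll rs (y + 1)

def srows : List Int → List Int → List (List Int)
  | cur, [] => [cur]
  | cur, o :: t => if o = 10 then cur :: srows [] t else srows (cur ++ [o]) t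

-- every key already in the map is strictly before (x, y) in row-major order
def keyInv (m : List (Int × Int × String)) (x y : Int) : Prop :=
  ∀ p ∈ m, p.2.1 < y ∨ (p.2.1 = y ∧ p.1 < x)

theorem pyDictSet_fresh (m : List (Int × Int × String)) (x y : Int) (v : String)
    (h : keyInv m x y) : pyDictSet m x y v = m ++ [(x, y, v)] := by
  induction m with
  | nil => rfl
  | cons p t ih =>
    obtain ⟨a, b, w⟩ := p
    have hp : b < y ∨ (b = y ∧ a < x) := h (a, b, w) (List.mem_cons_self)
    simp only [pyDictSet]
    rw [if_neg (by rintro ⟨rfl, rfl⟩; omega)]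
    rw [ih (fun q hq => h q (List.mem_cons_of_mem _ hq))]
    simp

theorem keyInv_append (m : List (Int × Int × String)) (x y : Int) (v : String)
    (h : keyInv m x y) : keyInv (m ++ [(x, y, v)]) (x + 1) y := by
  intro p hp
  rcases List.mem_append.1 hp with hp | hp
  · have := h p hp; omega
  · simp at hp; subst hp; exact Or.inr ⟨rfl, lt_add_one x⟩

theorem aLoop_spec (outputs : List Int) : ∀ (m : List (Int × Int × String)) (x y : Int),
    keyInv m x y → (outputs.foldl aStep (m, x, y)).1 = m ++ fSpec outputs x y := by
  induction outputs with
  | nil => intro m x y _; simp [fSpec]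
  | cons o t ih =>
    intro m x y h
    by_cases ho : o = 10
    · subst ho
      simp only [List.foldl_cons, aStep, beq_self_eq_true, if_pos trivial]
      rw [ih m 0 (y + 1) (fun p hp => by have := h p hp; omega)]
      simp [fSpec]
    · simp only [List.foldl_cons, aStep, beq_iff_eq, if_neg ho]
      rw [pyDictSet_fresh m x y _ h,
        ih _ (x + 1) y (keyInv_append m x y _ h)]
      simp [fSpec, ho]

def rowInv (m : List (Int × Int × String)) (y : Int) : Prop := ∀ p ∈ m, p.2.1 < y

theorem entRow_cons (o : Int) (t : List Int) (x y : Int) :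
    entRow (o :: t) x y = (x, y, pyChr o) :: entRow t (x + 1) y := by
  simp [entRow, PySem.List.enumerate_cons]

theorem mem_entRow_snd (row : List Int) (x y : Int) (p : Int × Int × String)
    (hp : p ∈ entRow row x y) : p.2.1 = y := by
  simp only [entRow, List.mem_map] at hp
  obtain ⟨q, _, rfl⟩ := hp
  rfl

theorem inner_spec (row : List Int) : ∀ (x y : Int) (m : List (Int × Int × String)),
    keyInv m x y → (PySem.List.enumerate row x).foldl (bInner y) m = m ++ entRow row x y := by
  induction row with
  | nil => intro x y m _; simp [entRow, PySem.List.enumerate_nil]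
  | cons o t ih =>
    intro x y m h
    rw [PySem.List.enumerate_cons, List.foldl_cons]
    show (PySem.List.enumerate t (x + 1)).foldl (bInner y) (pyDictSet m x y (pyChr o)) = _
    rw [pyDictSet_fresh m x y _ h, ih (x + 1) y _ (keyInv_append m x y _ h),
      entRow_cons]
    simp

theorem outer_spec (rs : List (List Int)) : ∀ (y : Int) (m : List (Int × Int × String)),
    rowInv m y → (PySem.List.enumerate rs y).foldl bOuter m = m ++ hAll rs y := by
  induction rs with
  | nil => intro y m _; simp [hAll, PySem.List.enumerate_nil]
  | cons r rest ih =>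
    intro y m h
    rw [PySem.List.enumerate_cons, List.foldl_cons]
    show (PySem.List.enumerate rest (y + 1)).foldl bOuter
        ((PySem.List.enumerate r).foldl (bInner y) m) = _
    rw [inner_spec r 0 y m (fun p hp => Or.inl (h p hp))]
    rw [ih (y + 1) _ (by
      intro p hp
      rcases List.mem_append.1 hp with hp | hp
      · have := h p hp; omega
      · have := mem_entRow_snd r 0 y p hp; omega)]
    simp [hAll]

theorem split_srows (outputs : List Int) : ∀ (rows : List (List Int)) (cur : List Int),
    (outputs.foldl bSplit (rows, cur)).1 ++ [(outputs.foldl bSplit (rows, cur)).2]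
      = rows ++ srows cur outputs := by
  induction outputs with
  | nil => intro rows cur; simp [srows]
  | cons o t ih =>
    intro rows cur
    by_cases ho : o = 10
    · subst ho
      simp only [List.foldl_cons, bSplit, beq_self_eq_true, if_true]
      rw [ih (rows ++ [cur]) []]
      simp [srows]
    · simp only [List.foldl_cons, bSplit, beq_iff_eq, if_neg ho]
      rw [ih rows (cur ++ [o])]
      simp [srows, ho]

theorem srows_hAll (outputs : List Int) : ∀ (cur : List Int) (y : Int),
    hAll (srows cur outputs) y = entRow cur 0 y ++ fSpec outputs (cur.length : Int) y := by
  induction outputs with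
  | nil => intro cur y; simp [srows, hAll, fSpec]
  | cons o t ih =>
    intro cur y
    by_cases ho : o = 10
    · subst ho
      simp only [srows, if_true]
      show entRow cur 0 y ++ hAll (srows [] t) (y + 1) = _
      rw [ih [] (y + 1)]
      simp [entRow, PySem.List.enumerate_nil, fSpec]
    · simp only [srows, if_neg ho]
      rw [ih (cur ++ [o]) y]
      have hext : entRow (cur ++ [o]) 0 y = entRow cur 0 y ++ [((cur.length : Int), y, pyChr o)] := by
        simp [entRow, PySem.List.enumerate_append, PySem.List.enumerate_cons,
          PySem.List.enumerate_nil]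
      rw [hext]
      simp only [fSpec, if_neg ho, List.length_append, List.length_cons, List.length_nil]
      push_cast
      simp [List.append_assoc]

-- ===== VERDICT (by name: the statement is the Claim_ definition above) =====
theorem process_outputs_spec : Claim_equal_process_outputs := by
  intro outputs _ _
  unfold Spec_process_outputs process_outputs process_outputs_alt
  rw [aLoop_spec outputs [] 0 0 (by intro p hp; simp at hp)]
  show [] ++ fSpec outputs 0 0 = List.foldl bOuter [] (PySem.List.enumerate
    ((List.foldl bSplit ([], []) outputs).1 ++ [(List.foldl bSplit ([], []) outputs).2]))
  rw [split_srows outputs [] []]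
  simp only [List.nil_append]
  rw [outer_spec (srows [] outputs) 0 [] (by intro p hp; simp at hp),
    srows_hAll outputs [] 0]
  simp [entRow, PySem.List.enumerate_nil]
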